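-- pv_equiv track=rewrite | github.com/FIFSAK/algorithms | 4 lab/j.py | balanced_bst_order
-- ===== SOURCE A (Python) =====
-- def balanced_bst_order(arr):
--     if not arr:  # Base case
--         return []
--
--     mid_idx = len(arr) // 2
--     middle = arr[mid_idx]
--
--     left_half = arr[:mid_idx]
--     right_half = arr[mid_idx+1:]
--
--     # Recursively get the order for the left and right halves
--     left_order = balanced_bst_order(left_half)
--     right_order = balanced_bst_order(right_half)
--
--     # Combine and return the order
--     return [middle] + left_order + right_order
-- ===== SOURCE B (Python) =====
-- def balanced_bst_order(arr):
--     result = []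
--     stack = [(0, len(arr))]
--     while stack:
--         lo, hi = stack.pop()
--         if lo >= hi:
--             continue
--         mid = lo + (hi - lo) // 2
--         result.append(arr[mid])
--         stack.append((mid + 1, hi))
--         stack.append((lo, mid))
--     return result
-- ===== Notes on version B (the rewrite author's own statement) =====
-- stated objective: faster
-- what changed: Replaces A's recursion over freshly-allocated list slices (and [middle]+left+right concatenations) with an iterative explicit LIFO stack of (lo, hi) half-open index ranges over the original array, appending into one result list; no recursion, no slicing, no copying.
import Mathlib
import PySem

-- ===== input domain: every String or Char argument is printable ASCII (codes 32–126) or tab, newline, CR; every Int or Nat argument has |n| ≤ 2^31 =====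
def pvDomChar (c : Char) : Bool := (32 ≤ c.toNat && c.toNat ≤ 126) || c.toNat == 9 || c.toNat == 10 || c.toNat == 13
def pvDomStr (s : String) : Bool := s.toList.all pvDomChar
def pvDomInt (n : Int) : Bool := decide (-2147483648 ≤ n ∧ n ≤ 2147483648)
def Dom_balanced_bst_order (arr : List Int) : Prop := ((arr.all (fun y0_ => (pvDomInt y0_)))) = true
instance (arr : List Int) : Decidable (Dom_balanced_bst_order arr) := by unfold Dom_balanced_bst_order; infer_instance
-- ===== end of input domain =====

-- B replaces A's recursion-on-slices with an iterative explicit stack of (lo,hi) index ranges; alternative decomposition, no copying.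


-- ===== PORT A =====
-- literal transliteration of A: recursion on the slices arr[:mid] and arr[mid+1:]
def balanced_bst_order (arr : List Int) : List Int :=
  if arr = [] then []
  else
    let mid_idx : Nat := arr.length / 2
    let middle : Int := (PySem.List.pyGet? arr (mid_idx : Int)).getD 0  -- index always in range here
    let left_half := PySem.List.slice arr none (some (mid_idx : Int))
    let right_half := PySem.List.slice arr (some ((mid_idx : Int) + 1)) none
    [middle] ++ balanced_bst_order left_half ++ balanced_bst_order right_half
termination_by arr.length
decreasing_by
  · rename_i h
    have hne : arr.length ≠ 0 := by simpa [List.length_eq_zero_iff] using h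
    rw [PySem.List.slice_to_natCast]
    simp only [List.length_take]
    omega
  · rename_i h
    have hne : arr.length ≠ 0 := by simpa [List.length_eq_zero_iff] using h
    have h1 : ((arr.length / 2 : Nat) : Int) + 1 = (((arr.length / 2 + 1 : Nat)) : Int) := by
      push_cast; ring
    rw [h1, PySem.List.slice_from_natCast]
    simp only [List.length_drop]
    omega

-- ===== PORT B =====
-- B's loop: pop a (lo,hi) range, emit arr[mid], push right then left (left ends on top).
def bstLoop (arr : List Int) (stack : List (Nat × Nat)) (result : List Int) : List Int :=
  match stack with
  | [] => result
  | (lo, hi) :: rest =>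
    if lo ≥ hi then bstLoop arr rest result
    else
      let mid := lo + (hi - lo) / 2
      bstLoop arr ((lo, mid) :: (mid + 1, hi) :: rest) (result ++ [arr.getD mid 0])
termination_by (stack.map (fun p => 2 * (p.2 - p.1) + 1)).sum
decreasing_by
  all_goals simp
  omega

def balanced_bst_order_alt (arr : List Int) : List Int :=
  bstLoop arr [(0, arr.length)] []

-- ===== PRECONDITION & SPEC =====
def Spec_balanced_bst_order (arr : List Int) (out : List Int) : Prop := out = balanced_bst_order_alt arr
instance (arr : List Int) (out : List Int) : Decidable (Spec_balanced_bst_order arr out) := by unfold Spec_balanced_bst_order; infer_instance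

-- ===== CLAIM (what is proved, stated in full; the proofs are below) =====
def Claim_equal_balanced_bst_order : Prop := ∀ (arr : List Int), Dom_balanced_bst_order arr → Spec_balanced_bst_order arr (balanced_bst_order arr)

-- ===== LEMMAS AND PROOFS =====

-- the shared recurrence, phrased on index ranges of the original array
def ordR (arr : List Int) (lo hi : Nat) : List Int :=
  if lo ≥ hi then []
  else
    arr.getD (lo + (hi - lo) / 2) 0
      :: (ordR arr lo (lo + (hi - lo) / 2) ++ ordR arr (lo + (hi - lo) / 2 + 1) hi)
termination_by hi - lo
decreasing_by all_goals omega

theorem ordR_stop (arr : List Int) (lo hi : Nat) (h : lo ≥ hi) : ordR arr lo hi = [] := by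
  rw [ordR]; simp [h]

theorem ordR_go (arr : List Int) (lo hi : Nat) (h : ¬ lo ≥ hi) :
    ordR arr lo hi = arr.getD (lo + (hi - lo) / 2) 0
      :: (ordR arr lo (lo + (hi - lo) / 2) ++ ordR arr (lo + (hi - lo) / 2 + 1) hi) := by
  rw [ordR]; simp [h]

theorem bstLoop_eq (arr : List Int) (stack : List (Nat × Nat)) (result : List Int) :
    bstLoop arr stack result = result ++ (stack.map (fun p => ordR arr p.1 p.2)).flatten := by
  induction stack, result using bstLoop.induct arr with
  | case1 result => simp [bstLoop]
  | case2 result lo hi rest h ih =>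
      rw [bstLoop, if_pos h, ih, List.map_cons, List.flatten_cons, ordR_stop arr lo hi h,
        List.nil_append]
  | case3 result lo hi rest h mid ih =>
      have hm : mid = lo + (hi - lo) / 2 := rfl
      rw [hm] at ih
      rw [bstLoop, if_neg h]
      show bstLoop arr ((lo, lo + (hi - lo) / 2) :: (lo + (hi - lo) / 2 + 1, hi) :: rest)
          (result ++ [arr.getD (lo + (hi - lo) / 2) 0])
        = result ++ (List.map (fun p => ordR arr p.1 p.2) ((lo, hi) :: rest)).flatten
      rw [ih]
      simp [ordR_go arr lo hi h]

theorem A_eq_ordR (arr : List Int) (n lo hi : Nat) (hhi : hi ≤ arr.length) (hn : hi - lo ≤ n) :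
    balanced_bst_order ((arr.drop lo).take (hi - lo)) = ordR arr lo hi := by
  induction n generalizing lo hi with
  | zero =>
      have h0 : hi - lo = 0 := by omega
      rw [h0, balanced_bst_order, if_pos (by simp), ordR_stop arr lo hi (by omega)]
  | succ n ih =>
      by_cases h : lo ≥ hi
      · have h0 : hi - lo = 0 := by omega
        rw [h0, balanced_bst_order, if_pos (by simp), ordR_stop arr lo hi h]
      · have hlen : ((arr.drop lo).take (hi - lo)).length = hi - lo := by
          simp only [List.length_take, List.length_drop]; omega
        have hne : (arr.drop lo).take (hi - lo) ≠ [] := by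
          intro hc
          rw [hc] at hlen
          simp only [List.length_nil] at hlen
          omega
        have hmid : ((arr.drop lo).take (hi - lo)).length / 2 = (hi - lo) / 2 := by rw [hlen]
        have hidx : lo + (hi - lo) / 2 < arr.length := by omega
        have hmiddle : (PySem.List.pyGet? ((arr.drop lo).take (hi - lo))
            ((((arr.drop lo).take (hi - lo)).length / 2 : Nat) : Int)).getD 0
            = arr.getD (lo + (hi - lo) / 2) 0 := by
          rw [PySem.List.pyGet?_natCast, hmid]
          rw [List.getElem?_take_of_lt (by omega), List.getElem?_drop]
          rw [List.getD_eq_getElem?_getD, List.getElem?_eq_getElem hidx]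
        have hleft : PySem.List.slice ((arr.drop lo).take (hi - lo)) none
            (some ((((arr.drop lo).take (hi - lo)).length / 2 : Nat) : Int))
            = (arr.drop lo).take ((lo + (hi - lo) / 2) - lo) := by
          rw [PySem.List.slice_to_natCast, hmid, List.take_take]
          congr 1
          omega
        have hright : PySem.List.slice ((arr.drop lo).take (hi - lo))
            (some (((((arr.drop lo).take (hi - lo)).length / 2 : Nat) : Int) + 1)) none
            = (arr.drop (lo + (hi - lo) / 2 + 1)).take (hi - (lo + (hi - lo) / 2 + 1)) := by
          have h1 : ((((arr.drop lo).take (hi - lo)).length / 2 : Nat) : Int) + 1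
              = ((((hi - lo) / 2 + 1 : Nat)) : Int) := by rw [hmid]; push_cast; ring
          rw [h1, PySem.List.slice_from_natCast, List.drop_take, List.drop_drop]
          congr 1
          omega
        rw [balanced_bst_order, if_neg hne, ordR_go arr lo hi h]
        simp only [hmiddle, hleft, hright,
          ih lo (lo + (hi - lo) / 2) (by omega) (by omega),
          ih (lo + (hi - lo) / 2 + 1) hi (by omega) (by omega)]
        simp

-- ===== VERDICT (by name: the statement is the Claim_ definition above) =====
theorem balanced_bst_order_spec : Claim_equal_balanced_bst_order := by
  intro arr _
  unfold Spec_balanced_bst_order balanced_bst_order_alt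
  rw [bstLoop_eq]
  simp only [List.map_cons, List.map_nil, List.flatten_cons, List.flatten_nil,
    List.nil_append, List.append_nil]
  rw [← A_eq_ordR arr arr.length 0 arr.length (le_refl _) (by omega)]
  simp
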